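-- pv_equiv track=rewrite | github.com/jonathonreilly/toy-physics | scripts/frontier_s3_cap_uniqueness.py | link_is_sphere
-- ===== SOURCE A (Python) =====
-- from collections import defaultdict
--
-- def link_is_sphere(dirs, edges, tris) -> bool:
--     """Check link is PL S^2: chi=2, closed (every edge in exactly 2 triangles)."""
--     V, E, F = len(dirs), len(edges), len(tris)
--     if V - E + F != 2:
--         return False
--     ec = defaultdict(int)
--     for tri in tris:
--         for pair in [(tri[0], tri[1]), (tri[0], tri[2]), (tri[1], tri[2])]:
--             ec[pair] += 1
--     return all(c == 2 for c in ec.values()) and len(ec) == E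
-- ===== SOURCE B (Python) =====
-- def link_is_sphere(dirs, edges, tris) -> bool:
--     """Check link is PL S^2: chi=2, closed (every edge in exactly 2 triangles)."""
--     V, E, F = len(dirs), len(edges), len(tris)
--     if V - E + F != 2:
--         return False
--     darts = []
--     for tri in tris:
--         darts += [(tri[0], tri[1]), (tri[0], tri[2]), (tri[1], tri[2])]
--     darts.sort()
--     runs = 0
--     i, n = 0, len(darts)
--     while i < n:
--         j = i + 1
--         while j < n and darts[j] == darts[i]:
--             j += 1
--         if j - i != 2:
--             return False
--         runs += 1
--         i = j
--     return runs == E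
-- ===== Notes on version B (the rewrite author's own statement) =====
-- stated objective: alternative
-- what changed: Replaces A's defaultdict hash-count of the directional edge tuples (all counts == 2 and distinct-key count == E) by building the flat list of directional edge tuples, sorting it, and making one linear pass that checks every run of equal tuples has length exactly 2 and counts the runs against E.
import Mathlib
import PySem

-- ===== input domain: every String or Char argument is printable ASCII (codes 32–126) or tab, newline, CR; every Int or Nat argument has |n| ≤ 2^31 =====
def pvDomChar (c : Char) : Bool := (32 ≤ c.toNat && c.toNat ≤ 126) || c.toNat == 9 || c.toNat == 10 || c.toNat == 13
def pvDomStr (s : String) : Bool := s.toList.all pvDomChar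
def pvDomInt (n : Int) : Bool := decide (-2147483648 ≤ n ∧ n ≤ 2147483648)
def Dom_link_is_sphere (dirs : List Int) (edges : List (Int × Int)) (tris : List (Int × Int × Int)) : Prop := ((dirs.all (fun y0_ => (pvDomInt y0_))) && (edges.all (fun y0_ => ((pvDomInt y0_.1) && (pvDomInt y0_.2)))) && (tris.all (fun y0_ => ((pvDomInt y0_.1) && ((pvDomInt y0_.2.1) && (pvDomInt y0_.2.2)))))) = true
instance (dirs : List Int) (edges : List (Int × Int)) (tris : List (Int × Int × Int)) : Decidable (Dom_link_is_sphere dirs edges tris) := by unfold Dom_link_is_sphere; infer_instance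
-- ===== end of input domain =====

-- B replaces A's hash-counting of directed edges by sort-then-scan over runs of equal
-- edge tuples (alternative decomposition, same overall cost on these inputs).

-- ===== PORT A =====
def link_is_sphere (dirs : List Int) (edges : List (Int × Int)) (tris : List (Int × Int × Int)) : Bool :=
  let V : Int := dirs.length
  let E : Int := edges.length
  let F : Int := tris.length
  if V - E + F ≠ 2 then false
  else
    let ec : PySem.Dict (Int × Int) Int :=
      tris.foldl (fun d tri =>
        [(tri.1, tri.2.1), (tri.1, tri.2.2), (tri.2.1, tri.2.2)].foldl
          (fun d pair => d.modify pair 0 (· + 1)) d) PySem.Dict.empty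
    (ec.values.all (fun c => c == 2)) && ((ec.size : Int) == E)

-- ===== PORT B =====
-- the 'while i < n' run-scan of Source B: one run of equal leading elements per step
def pvScanRuns : List (Int × Int) → Option Nat
  | [] => some 0
  | x :: rest =>
    let j := (rest.takeWhile (fun y => y == x)).length + 1
    if j ≠ 2 then none
    else (pvScanRuns (rest.dropWhile (fun y => y == x))).map (· + 1)
termination_by l => l.length
decreasing_by simpa using Nat.lt_succ_of_le (List.length_dropWhile_le _ rest)

def link_is_sphere_alt (dirs : List Int) (edges : List (Int × Int)) (tris : List (Int × Int × Int)) : Bool :=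
  let V : Int := dirs.length
  let E : Int := edges.length
  let F : Int := tris.length
  if V - E + F ≠ 2 then false
  else
    let darts := tris.foldl
      (fun acc tri => acc ++ [(tri.1, tri.2.1), (tri.1, tri.2.2), (tri.2.1, tri.2.2)]) []
    match pvScanRuns (PySem.List.sorted2 darts Prod.fst Prod.snd) with
    | none => false
    | some runs => (runs : Int) == E

-- ===== PRECONDITION & SPEC =====
def Spec_link_is_sphere (dirs : List Int) (edges : List (Int × Int)) (tris : List (Int × Int × Int)) (out : Bool) : Prop := out = link_is_sphere_alt dirs edges tris
instance (dirs : List Int) (edges : List (Int × Int)) (tris : List (Int × Int × Int)) (out : Bool) : Decidable (Spec_link_is_sphere dirs edges tris out) := by unfold Spec_link_is_sphere; infer_instance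

-- ===== CLAIM (what is proved, stated in full; the proofs are below) =====
def Claim_equal_link_is_sphere : Prop := ∀ (dirs : List Int) (edges : List (Int × Int)) (tris : List (Int × Int × Int)), Dom_link_is_sphere dirs edges tris → Spec_link_is_sphere dirs edges tris (link_is_sphere dirs edges tris)

-- ===== LEMMAS AND PROOFS =====

-- Python's lexicographic '<' on int pairs, as sorted2 compares
def pvLexLt (a b : Int × Int) : Bool :=
  decide (a.1 < b.1) || (!decide (b.1 < a.1) && decide (a.2 < b.2))

theorem pvLexLt_true_iff (a b : Int × Int) :
    pvLexLt a b = true ↔ (a.1 < b.1 ∨ (¬ b.1 < a.1 ∧ a.2 < b.2)) := by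
  simp [pvLexLt]

theorem pvLexLt_false_iff (a b : Int × Int) :
    pvLexLt a b = false ↔ ¬ (a.1 < b.1 ∨ (¬ b.1 < a.1 ∧ a.2 < b.2)) := by
  rw [← pvLexLt_true_iff]
  simp

theorem pvLexLt_asymm {a b : Int × Int} (h : pvLexLt a b = true) : pvLexLt b a = false := by
  rw [pvLexLt_true_iff] at h; rw [pvLexLt_false_iff]; omega

theorem pvLexLt_trans {a b c : Int × Int} (h1 : pvLexLt a b = true) (h2 : pvLexLt b c = true) :
    pvLexLt a c = true := by
  rw [pvLexLt_true_iff] at *; omega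

theorem pvLexLt_antisymm {a b : Int × Int} (h1 : pvLexLt a b = false)
    (h2 : pvLexLt b a = false) : a = b := by
  rw [pvLexLt_false_iff] at *
  rw [Prod.ext_iff]; omega

-- a can come before b
def pvLe (a b : Int × Int) : Prop := pvLexLt b a = false

theorem pvLe_of_lt {a b : Int × Int} (h : pvLexLt a b = true) : pvLe a b := pvLexLt_asymm h

theorem pvLe_trans_lt {x z y : Int × Int} (hxy : pvLexLt x y = true) (hzy : pvLe y z) :
    pvLe x z := by
  unfold pvLe at *
  cases hzx : pvLexLt z x with
  | false => rfl
  | true => rw [pvLexLt_trans hzx hxy] at hzy; cases hzy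

theorem pairwise_insertBy (x : Int × Int) (ys : List (Int × Int)) (h : ys.Pairwise pvLe) :
    (PySem.List.insertBy pvLexLt x ys).Pairwise pvLe := by
  induction ys with
  | nil => simp [PySem.List.insertBy]
  | cons y ys ih =>
    rw [List.pairwise_cons] at h
    obtain ⟨hy, hys⟩ := h
    by_cases hxy : pvLexLt x y = true
    · simp only [PySem.List.insertBy, hxy, if_pos]
      refine List.Pairwise.cons ?_ (List.Pairwise.cons hy hys)
      intro z hz
      rcases List.mem_cons.1 hz with rfl | hz
      · exact pvLe_of_lt hxy
      · exact pvLe_trans_lt hxy (hy z hz)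
    · rw [Bool.not_eq_true] at hxy
      simp only [PySem.List.insertBy, hxy]
      refine List.Pairwise.cons ?_ (ih hys)
      intro z hz
      rcases (PySem.List.mem_insertBy _ _ _ _).1 hz with rfl | hz
      · exact hxy
      · exact hy z hz

theorem pairwise_foldl_insertBy (xs : List (Int × Int)) :
    ∀ acc : List (Int × Int), acc.Pairwise pvLe →
      (xs.foldl (fun acc x => PySem.List.insertBy pvLexLt x acc) acc).Pairwise pvLe := by
  induction xs with
  | nil => intro acc h; simpa using h
  | cons x xs ih =>
    intro acc h
    exact ih _ (pairwise_insertBy x acc h)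

theorem sorted2_eq_foldl (xs : List (Int × Int)) :
    PySem.List.sorted2 xs Prod.fst Prod.snd =
      xs.foldl (fun acc x => PySem.List.insertBy pvLexLt x acc) [] := rfl

theorem sorted2_pairwise (xs : List (Int × Int)) :
    (PySem.List.sorted2 xs Prod.fst Prod.snd).Pairwise pvLe := by
  rw [sorted2_eq_foldl]
  exact pairwise_foldl_insertBy xs [] (List.Pairwise.nil)

-- after dropping the leading run of x's from a sorted tail, x never reappears
theorem not_mem_dropWhile (x : Int × Int) :
    ∀ rest : List (Int × Int), rest.Pairwise pvLe → (∀ y ∈ rest, pvLe x y) →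
      x ∉ rest.dropWhile (fun y => y == x) := by
  intro rest
  induction rest with
  | nil => simp
  | cons z t ih =>
    intro hpw hall
    rw [List.pairwise_cons] at hpw
    cases hz : (z == x) with
    | true =>
      rw [List.dropWhile_cons_of_pos (by simp [hz])]
      exact ih hpw.2 (fun y hy => hall y (List.mem_cons_of_mem z hy))
    | false =>
      rw [List.dropWhile_cons_of_neg (by simp [hz])]
      intro hmem
      have hzx : z ≠ x := by simpa using hz
      rcases List.mem_cons.1 hmem with rfl | hxt
      · exact hzx rfl
      · exact hzx (pvLexLt_antisymm (hall z (List.mem_cons_self)) (hpw.1 x hxt))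

theorem pairwise_tail {x : Int × Int} {rest : List (Int × Int)}
    (hpw : (x :: rest).Pairwise pvLe) :
    (rest.dropWhile (fun y => y == x)).Pairwise pvLe :=
  List.Pairwise.sublist (List.dropWhile_sublist _) ((List.pairwise_cons.1 hpw).2)

theorem scan_spec : ∀ s : List (Int × Int), s.Pairwise pvLe →
    pvScanRuns s = if (∀ x ∈ s, s.count x = 2) then some s.toFinset.card else none := by
  intro s
  induction s using pvScanRuns.induct with
  | case1 => simp [pvScanRuns]
  | case2 x rest j hj =>
    intro hpw
    rw [List.pairwise_cons] at hpw
    have hxt : x ∉ rest.dropWhile (fun y => y == x) :=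
      not_mem_dropWhile x rest hpw.2 hpw.1
    have hcount : (x :: rest).count x = (rest.takeWhile (fun y => y == x)).length + 1 := by
      have hsplit := List.takeWhile_append_dropWhile (p := fun y => y == x) (l := rest)
      have h1 : (rest.takeWhile (fun y => y == x)).count x
          = (rest.takeWhile (fun y => y == x)).length := by
        rw [List.count_eq_length]
        intro b hb
        exact (by simpa using List.mem_takeWhile_imp hb : b = x).symm
      have h2 : (rest.dropWhile (fun y => y == x)).count x = 0 := List.count_eq_zero.2 hxt
      calc (x :: rest).count x = rest.count x + 1 := List.count_cons_self
        _ = (rest.takeWhile (fun y => y == x)).count x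
            + (rest.dropWhile (fun y => y == x)).count x + 1 := by
              conv_lhs => rw [← hsplit]
              rw [List.count_append]
        _ = _ := by rw [h1, h2]
    have hLHS : pvScanRuns (x :: rest) = none := by
      simp only [pvScanRuns]
      rw [if_pos (show (rest.takeWhile (fun y => y == x)).length + 1 ≠ 2 from hj)]
    rw [hLHS, if_neg]
    intro hall
    have := hall x (List.mem_cons_self)
    rw [hcount] at this
    have hj' : (rest.takeWhile (fun y => y == x)).length + 1 ≠ 2 := hj
    omega
  | case3 x rest j hj ih =>
    intro hpw
    have hpwt : (rest.dropWhile (fun y => y == x)).Pairwise pvLe := pairwise_tail hpw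
    rw [List.pairwise_cons] at hpw
    have hxt : x ∉ rest.dropWhile (fun y => y == x) :=
      not_mem_dropWhile x rest hpw.2 hpw.1
    have hj2 : (rest.takeWhile (fun y => y == x)).length + 1 = 2 := not_ne_iff.mp hj
    have hlen : (rest.takeWhile (fun y => y == x)).length = 1 := by omega
    obtain ⟨a, ha⟩ := List.length_eq_one_iff.1 hlen
    have hax : a = x := by
      have : a ∈ rest.takeWhile (fun y => y == x) := by rw [ha]; exact List.mem_singleton_self a
      simpa using List.mem_takeWhile_imp this
    have hrest : rest = x :: rest.dropWhile (fun y => y == x) := by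
      conv_lhs => rw [← List.takeWhile_append_dropWhile (p := fun y => y == x) (l := rest)]
      rw [ha, hax]
      rfl
    have hct0 : (rest.dropWhile (fun y => y == x)).count x = 0 := List.count_eq_zero.2 hxt
    have hLHS : pvScanRuns (x :: rest)
        = (pvScanRuns (rest.dropWhile (fun y => y == x))).map (· + 1) := by
      simp only [pvScanRuns]
      rw [if_neg (show ¬ (rest.takeWhile (fun y => y == x)).length + 1 ≠ 2 from hj)]
    rw [hLHS, ih hpwt]
    by_cases hc : ∀ y ∈ rest.dropWhile (fun y => y == x),
        (rest.dropWhile (fun y => y == x)).count y = 2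
    · rw [if_pos hc, Option.map_some, if_pos]
      · congr 1
        conv_rhs => rw [hrest]
        rw [List.toFinset_cons, List.toFinset_cons, Finset.insert_idem,
          Finset.card_insert_of_notMem (by simpa using hxt)]
      · intro y hy
        rw [hrest] at hy ⊢
        rcases List.mem_cons.1 hy with rfl | hy'
        · simp [List.count_cons_self, hct0]
        · rcases List.mem_cons.1 hy' with rfl | hy''
          · simp [List.count_cons_self, hct0]
          · have hyx : y ≠ x := fun h => hxt (h ▸ hy'')
            rw [List.count_cons_of_ne (Ne.symm hyx), List.count_cons_of_ne (Ne.symm hyx)]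
            exact hc y hy''
    · rw [if_neg hc, Option.map_none, if_neg]
      intro hall
      apply hc
      intro y hy
      have hyx : y ≠ x := fun h => hxt (h ▸ hy)
      have hys : y ∈ x :: rest := by
        rw [hrest]; exact List.mem_cons_of_mem _ (List.mem_cons_of_mem _ hy)
      have := hall y hys
      rw [hrest, List.count_cons_of_ne (Ne.symm hyx), List.count_cons_of_ne (Ne.symm hyx)] at this
      exact this

-- ===== VERDICT (by name: the statement is the Claim_ definition above) =====
theorem link_is_sphere_spec : Claim_equal_link_is_sphere := by
  intro dirs edges tris _
  unfold Spec_link_is_sphere link_is_sphere link_is_sphere_alt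
  simp only []
  by_cases heuler : (dirs.length : Int) - edges.length + tris.length ≠ 2
  · rw [if_pos heuler, if_pos heuler]
  · rw [if_neg heuler, if_neg heuler]
    -- the flat list of directional edge tuples
    set darts := tris.flatMap
      (fun tri => [(tri.1, tri.2.1), (tri.1, tri.2.2), (tri.2.1, tri.2.2)]) with hdarts
    have hBdarts : tris.foldl
        (fun acc tri => acc ++ [(tri.1, tri.2.1), (tri.1, tri.2.2), (tri.2.1, tri.2.2)]) []
        = darts := by
      rw [PySem.List.foldl_append_eq_flatMap, List.nil_append, hdarts]
    have hAec : tris.foldl (fun d tri =>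
        [(tri.1, tri.2.1), (tri.1, tri.2.2), (tri.2.1, tri.2.2)].foldl
          (fun d pair => d.modify pair 0 (· + 1)) d) PySem.Dict.empty
        = PySem.Dict.counter darts := by
      rw [PySem.Dict.counter_eq_foldl, hdarts, List.foldl_flatMap]
    rw [hBdarts, hAec]
    set s := PySem.List.sorted2 darts Prod.fst Prod.snd with hs
    have hperm : s.Perm darts := PySem.List.sorted2_perm darts Prod.fst Prod.snd false
    rw [scan_spec s (sorted2_pairwise darts)]
    have hval : (PySem.Dict.counter darts).values
        = (PySem.Set.ofList darts).map (fun k => ((darts.count k : Int))) := by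
      unfold PySem.Dict.values
      rw [PySem.Dict.items_counter, List.map_map]
      rfl
    have hsize : ((PySem.Dict.counter darts).size : Int) = (s.toFinset.card : Int) := by
      unfold PySem.Dict.size
      rw [PySem.Dict.items_counter, List.length_map]
      congr 1
      rw [← List.toFinset_card_of_nodup (PySem.Set.nodup_ofList darts)]
      congr 1
      · apply Finset.ext
        intro k
        simp [List.mem_toFinset, PySem.Set.mem_ofList, hperm.mem_iff]
    have hcond : (∀ x ∈ s, s.count x = 2) ↔ (∀ k ∈ darts, darts.count k = 2) := by
      constructor
      · intro h k hk
        have := h k (hperm.mem_iff.2 hk)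
        rwa [hperm.count_eq] at this
      · intro h x hx
        rw [hperm.count_eq]
        exact h x (hperm.mem_iff.1 hx)
    by_cases hP : ∀ k ∈ darts, darts.count k = 2
    · rw [if_pos (hcond.2 hP)]
      have hall : ((PySem.Dict.counter darts).values.all (fun c => c == 2)) = true := by
        rw [hval, List.all_eq_true]
        intro c hc
        obtain ⟨k, hk, rfl⟩ := List.mem_map.1 hc
        have := hP k ((PySem.Set.mem_ofList darts k).1 hk)
        simp [this]
      rw [hall, Bool.true_and, hsize]
    · rw [if_neg (fun h => hP (hcond.1 h))]
      have hall : ((PySem.Dict.counter darts).values.all (fun c => c == 2)) = false := by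
        rw [hval]
        push Not at hP
        obtain ⟨k, hk, hk2⟩ := hP
        rw [List.all_eq_false]
        refine ⟨(darts.count k : Int), List.mem_map.2 ⟨k, (PySem.Set.mem_ofList darts k).2 hk, rfl⟩, ?_⟩
        intro hh
        have h2 := beq_iff_eq.mp hh
        exact hk2 (by exact_mod_cast h2)
      rw [hall, Bool.false_and]
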